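-- pv_equiv track=rewrite | github.com/thomaswsu/Financial_Trading_Data_Assignement | test.py | combos
-- ===== SOURCE A (Python) =====
-- import math
--
-- def combos(wordSet, sentences):
--   bank = {}
--   for word in wordSet:
--     order = list(word)
--     order.sort()
--     bank[tuple(order)] = bank.get(tuple(order),0) + 1
--   total = 0
--   for ana in bank:
--     total += math.factorial(bank[ana])
--
--   return total
-- ===== SOURCE B (Python) =====
-- import math
--
-- def combos(wordSet, sentences):
--     sigs = sorted(sorted(w) for w in wordSet)
--     total = 0
--     i = 0
--     n = len(sigs)
--     while i < n:
--         j = i + 1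
--         while j < n and sigs[j] == sigs[i]:
--             j += 1
--         total += math.factorial(j - i)
--         i = j
--     return total
-- ===== Notes on version B (the rewrite author's own statement) =====
-- stated objective: alternative
-- what changed: Replaces the hash-dict count accumulation followed by a keys pass with a sort-then-scan: all anagram signatures are sorted and equal runs are measured by a run-length two-index loop, summing factorial of each run length.
import Mathlib
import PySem

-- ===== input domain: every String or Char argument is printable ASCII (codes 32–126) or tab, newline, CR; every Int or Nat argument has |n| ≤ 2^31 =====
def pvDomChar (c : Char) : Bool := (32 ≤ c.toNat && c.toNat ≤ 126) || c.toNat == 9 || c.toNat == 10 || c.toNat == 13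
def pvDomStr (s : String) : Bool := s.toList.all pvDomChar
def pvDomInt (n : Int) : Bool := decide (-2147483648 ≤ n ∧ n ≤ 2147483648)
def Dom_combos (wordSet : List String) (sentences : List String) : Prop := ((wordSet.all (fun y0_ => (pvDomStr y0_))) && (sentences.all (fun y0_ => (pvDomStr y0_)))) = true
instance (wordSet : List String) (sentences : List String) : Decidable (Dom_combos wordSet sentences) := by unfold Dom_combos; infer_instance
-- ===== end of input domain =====

-- B replaces A's dict-count accumulation by sort-the-signatures + run-length scan; objective: alternative (same result, different algorithm).

-- ===== PORT A =====
-- math.factorial (arguments here are always positive counts)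
def pyFact (n : Int) : Int := (Nat.factorial n.toNat : Int)

-- tuple(sorted(list(word)))
def pySig (w : String) : List Char := PySem.List.sorted w.toList (fun c => c) false

def combos (wordSet : List String) (sentences : List String) : Int :=
  let bank : PySem.Dict (List Char) Int :=
    wordSet.foldl (fun bank word =>
      let order := pySig word
      bank.insert order (bank.getD order 0 + 1)) PySem.Dict.empty
  bank.keys.foldl (fun total ana => total + pyFact (bank.getD ana 0)) 0

-- ===== PORT B =====
-- sorted(...) over lists of chars: Python's lexicographic list order = the List Char linear order
def sortSigs (l : List (List Char)) : List (List Char) :=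
  @PySem.List.sorted _ _ List.instLinearOrder.toLT LinearOrder.toDecidableLT l (fun s => s) false

-- the outer while loop of Source B: each step consumes one maximal run sigs[i..j) of equal
-- signatures (the inner while = takeWhile/dropWhile) and adds factorial(j - i)
def runSum : List (List Char) → Int
  | [] => 0
  | x :: rest =>
      pyFact (1 + (rest.takeWhile (fun y => y == x)).length) +
        runSum (rest.dropWhile (fun y => y == x))
termination_by l => l.length
decreasing_by
  have := List.length_dropWhile_le (fun y => y == x) rest
  simp; omega

def combos_alt (wordSet : List String) (sentences : List String) : Int :=
  runSum (sortSigs (wordSet.map pySig))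

-- ===== PRECONDITION & SPEC =====
def Spec_combos (wordSet : List String) (sentences : List String) (out : Int) : Prop := out = combos_alt wordSet sentences
instance (wordSet : List String) (sentences : List String) (out : Int) : Decidable (Spec_combos wordSet sentences out) := by unfold Spec_combos; infer_instance

-- ===== CLAIM (what is proved, stated in full; the proofs are below) =====
def Claim_equal_combos : Prop := ∀ (wordSet : List String) (sentences : List String), Dom_combos wordSet sentences → Spec_combos wordSet sentences (combos wordSet sentences)

-- ===== LEMMAS AND PROOFS =====

-- A's value: sum of factorials of multiplicities over the distinct signatures
lemma combos_eq_sum (wordSet sentences : List String) :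
    combos wordSet sentences =
      ((PySem.Set.ofList (wordSet.map pySig)).map
        (fun k => pyFact ((wordSet.map pySig).count k))).sum := by
  show (wordSet.foldl _ PySem.Dict.empty).keys.foldl _ 0 = _
  have hfold :
      (wordSet.foldl (fun (bank : PySem.Dict (List Char) Int) word =>
          bank.insert (pySig word) (bank.getD (pySig word) 0 + 1)) PySem.Dict.empty)
        = PySem.Dict.counter (wordSet.map pySig) := by
    rw [← PySem.Dict.foldl_insert_getD_add_one_eq_counter (wordSet.map pySig),
        List.foldl_map]
  rw [hfold, PySem.List.foldl_add]
  simp [PySem.Dict.keys_counter, PySem.Dict.getD_counter]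

-- B's run-length scan over a sorted list yields the same sum over some duplicate-free
-- enumeration of its elements
lemma runSum_sorted (n : Nat) : ∀ (l : List (List Char)), l.length ≤ n → l.Pairwise (· ≤ ·) →
    ∃ D : List (List Char), D.Nodup ∧ (∀ k, k ∈ D ↔ k ∈ l) ∧
      runSum l = (D.map (fun k => pyFact (l.count k))).sum := by
  induction n with
  | zero =>
      intro l hl _
      have : l = [] := List.eq_nil_of_length_eq_zero (Nat.le_zero.mp hl)
      subst this
      exact ⟨[], by simp, by simp, by simp [runSum]⟩
  | succ n ih =>
      intro l hl hp
      match l, hl, hp with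
      | [], _, _ => exact ⟨[], by simp, by simp, by simp [runSum]⟩
      | x :: rest, hl, hp =>
        have hx : ∀ y ∈ rest, x ≤ y := (List.pairwise_cons.mp hp).1
        have hrest : rest.Pairwise (· ≤ ·) := (List.pairwise_cons.mp hp).2
        have htd : rest.takeWhile (fun y => y == x) ++ rest.dropWhile (fun y => y == x) = rest :=
          List.takeWhile_append_dropWhile
        have htall : ∀ y ∈ rest.takeWhile (fun y => y == x), y = x := by
          intro y hy
          exact eq_of_beq (List.mem_takeWhile_imp (p := fun y => y == x) (l := rest) hy)
        -- x does not occur past the run of x's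
        have hxd : x ∉ rest.dropWhile (fun y => y == x) := by
          intro hmem
          have hne : rest.dropWhile (fun y => y == x) ≠ [] := List.ne_nil_of_mem hmem
          have hh0 : (((rest.dropWhile (fun y => y == x)).head hne) == x) = false :=
            List.head_dropWhile_not _ hne
          have hh0x : (rest.dropWhile (fun y => y == x)).head hne ≠ x := by
            intro h; rw [h] at hh0; simp at hh0
          have hh0mem : (rest.dropWhile (fun y => y == x)).head hne ∈ rest :=
            (List.dropWhile_sublist _).subset (List.head_mem hne)
          have hxh0 : x ≤ (rest.dropWhile (fun y => y == x)).head hne := hx _ hh0mem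
          rw [← List.cons_head_tail hne] at hmem
          rcases List.mem_cons.mp hmem with h | h
          · exact hh0x h.symm
          · have hpd : ((rest.dropWhile (fun y => y == x)).head hne
                :: (rest.dropWhile (fun y => y == x)).tail).Pairwise (· ≤ ·) := by
              rw [List.cons_head_tail hne]
              exact hrest.sublist (List.dropWhile_sublist _)
            have : (rest.dropWhile (fun y => y == x)).head hne ≤ x :=
              (List.pairwise_cons.mp hpd).1 x h
            exact hh0x (le_antisymm this hxh0)
        have hdlen : (rest.dropWhile (fun y => y == x)).length ≤ n := by
          have h1 := List.length_dropWhile_le (fun y => y == x) rest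
          have h2 : rest.length ≤ n := by simpa using Nat.succ_le_succ_iff.mp hl
          omega
        have hpd : (rest.dropWhile (fun y => y == x)).Pairwise (· ≤ ·) :=
          hrest.sublist (List.dropWhile_sublist _)
        obtain ⟨D', hnd', hmem', hsum'⟩ := ih (rest.dropWhile (fun y => y == x)) hdlen hpd
        refine ⟨x :: D', ?_, ?_, ?_⟩
        · exact List.nodup_cons.mpr ⟨fun h => hxd ((hmem' x).mp h), hnd'⟩
        · intro k
          constructor
          · intro hk
            rcases List.mem_cons.mp hk with h | h
            · simp [h]
            · have : k ∈ rest.dropWhile (fun y => y == x) := (hmem' k).mp h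
              have : k ∈ rest := by rw [← htd]; exact List.mem_append_right _ this
              exact List.mem_cons_of_mem x this
          · intro hk
            rcases List.mem_cons.mp hk with h | h
            · simp [h]
            · rw [← htd] at h
              rcases List.mem_append.mp h with h | h
              · simp [htall k h]
              · exact List.mem_cons_of_mem x ((hmem' k).mpr h)
        · -- the sums agree
          have hcx : (x :: rest).count x = (rest.takeWhile (fun y => y == x)).length + 1 := by
            have h1 : (rest.takeWhile (fun y => y == x)).count x
                = (rest.takeWhile (fun y => y == x)).length :=
              List.count_eq_length.mpr (fun b hb => (htall b hb).symm)
            have h2 : (rest.dropWhile (fun y => y == x)).count x = 0 :=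
              List.count_eq_zero.mpr hxd
            have h3 : (x :: (rest.takeWhile (fun y => y == x) ++ rest.dropWhile (fun y => y == x))).count x
                = (rest.takeWhile (fun y => y == x)).length + 1 := by
              rw [List.count_cons_self, List.count_append, h1, h2]
            rwa [htd] at h3
          have hck : ∀ k ∈ D', (x :: rest).count k = (rest.dropWhile (fun y => y == x)).count k := by
            intro k hk
            have hkd : k ∈ rest.dropWhile (fun y => y == x) := (hmem' k).mp hk
            have hkx : k ≠ x := fun h => hxd (h ▸ hkd)
            have ht0 : (rest.takeWhile (fun y => y == x)).count k = 0 :=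
              List.count_eq_zero.mpr (fun h => hkx (htall k h))
            have h3 : (x :: (rest.takeWhile (fun y => y == x) ++ rest.dropWhile (fun y => y == x))).count k
                = (rest.dropWhile (fun y => y == x)).count k := by
              simp only [List.count_cons, List.count_append, ht0]
              have hxk : (x == k) = false := by
                simp only [beq_eq_false_iff_ne]; exact fun h => hkx h.symm
              simp [hxk]
            rwa [htd] at h3
          rw [runSum, hsum', List.map_cons, List.sum_cons]
          have harg : ((1 : Int) + ((rest.takeWhile (fun y => y == x)).length : Int))
              = (((rest.takeWhile (fun y => y == x)).length + 1 : Nat) : Int) := by push_cast; ring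
          congr 1
          · rw [hcx, harg]
          · exact congrArg List.sum
              (List.map_congr_left (fun k hk => by rw [hck k hk])).symm

theorem combos_spec : Claim_equal_combos := by
  intro wordSet sentences _
  show combos wordSet sentences = combos_alt wordSet sentences
  set L := wordSet.map pySig with hL
  have hperm : (sortSigs L).Perm L :=
    @PySem.List.sorted_perm _ _ List.instLinearOrder.toLT LinearOrder.toDecidableLT L (fun s => s) false
  have hpw : (sortSigs L).Pairwise (· ≤ ·) := PySem.List.sorted_pairwise L (fun s => s)
  obtain ⟨D, hnd, hmem, hsum⟩ := runSum_sorted (sortSigs L).length (sortSigs L) le_rfl hpw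
  have hcounts : ∀ k, (sortSigs L).count k = L.count k := fun k => hperm.count_eq k
  have hDperm : D.Perm (PySem.Set.ofList L) := by
    rw [List.perm_ext_iff_of_nodup hnd (PySem.Set.nodup_ofList L)]
    intro k
    rw [hmem k, PySem.Set.mem_ofList]
    exact hperm.mem_iff
  have hmapD : D.map (fun k => pyFact ((sortSigs L).count k))
      = D.map (fun k => pyFact (L.count k)) :=
    List.map_congr_left (fun k _ => by rw [hcounts k])
  rw [combos_eq_sum]
  show _ = runSum (sortSigs L)
  rw [hsum, hmapD, (hDperm.map (fun k => pyFact (L.count k))).sum_eq]
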